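-- pv_equiv track=rewrite | github.com/ToyotaCRDL/extended-bell-measurements | pauli.py | get_bitscoef
-- ===== SOURCE A (Python) =====
-- def get_bitscoef(pauli_string, coef):
--
--     nb_qubits = len(pauli_string)
--
--     bitscoef = []
--
--     pp = ''.join(pauli_string)
--     for i in range(2**nb_qubits):
--
--         bits = bin(i)[2:].zfill(nb_qubits)
--
--         nb_xyz = 0
--
--         for p, b in zip(pp, bits):
--
--             if p != 'I' and b == '1':
--                 nb_xyz += 1
--
--         if not nb_xyz % 2:
--             bitscoef += [(bits, coef)]
--         else:
--             bitscoef += [(bits, -coef)]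
--
--     return bitscoef
-- ===== SOURCE B (Python) =====
-- def get_bitscoef(pauli_string, coef):
--     # Tensor-product doubling: grow all bitstrings one position at a time,
--     # carrying the cumulative sign, instead of scanning each of the 2**n
--     # integers and recomputing its parity.
--     n = len(pauli_string)
--     pp = ''.join(pauli_string)
--     result = [('', coef)]
--     for i in range(n):
--         # position i flips the sign iff the i-th character of the joined
--         # Pauli string exists and is not 'I'
--         flip = i < len(pp) and pp[i] != 'I'
--         new = []
--         for s, c in result:
--             new.append((s + '0', c))
--             new.append((s + '1', -c if flip else c))
--         result = new
--     return result
-- ===== Notes on version B (the rewrite author's own statement) =====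
-- stated objective: alternative
-- what changed: Replaces the scan over all 2^n integers (each with bin/zfill formatting and an inner parity loop over the Pauli characters) by a tensor-product doubling recurrence that starts from [('', coef)] and, for each Pauli position, rebuilds the list with a '0' child and a sign-adjusted '1' child, so no per-index parity recomputation is needed.
-- intended difference: On the empty Pauli string A returns [('0', coef)] because bin(0)[2:] is '0' and zfill(0) does not truncate it, while B returns [('', coef)], the correct single length-0 bitstring for 0 qubits. — e.g. on get_bitscoef([], 1): A returns [("0", 1)], B returns [("", 1)]
import Mathlib
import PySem

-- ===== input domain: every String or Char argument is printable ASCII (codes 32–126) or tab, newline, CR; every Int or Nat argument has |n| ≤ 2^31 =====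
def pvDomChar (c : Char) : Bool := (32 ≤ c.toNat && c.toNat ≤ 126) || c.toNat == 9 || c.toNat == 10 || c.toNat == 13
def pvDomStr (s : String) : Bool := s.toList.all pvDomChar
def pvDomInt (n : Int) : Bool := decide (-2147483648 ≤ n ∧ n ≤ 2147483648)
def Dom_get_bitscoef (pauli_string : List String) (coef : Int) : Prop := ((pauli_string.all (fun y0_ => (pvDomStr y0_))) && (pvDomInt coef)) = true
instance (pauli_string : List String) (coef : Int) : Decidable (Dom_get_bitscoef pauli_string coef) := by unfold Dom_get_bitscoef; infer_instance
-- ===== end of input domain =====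

-- B replaces the per-integer parity scan by a tensor-product doubling recurrence
-- over the Pauli positions (alternative decomposition; on 0 qubits B returns the
-- intended empty bitstring where A returns "0", see D_ below).


-- ===== PORT A =====
-- bin(i)[2:] for i ≥ 1 (empty for 0); bin(0)[2:] = "0" handled in pvBinRep
def pvBin' : Nat → List Char
  | 0 => []
  | n+1 => pvBin' ((n+1) / 2) ++ [if (n+1) % 2 = 1 then '1' else '0']
  decreasing_by exact Nat.div_lt_self (Nat.succ_pos n) (by omega)

def pvBinRep (i : Nat) : List Char := if i = 0 then ['0'] else pvBin' i

-- s.zfill(n): left-pad with '0' (never truncates)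
def pvZfill (n : Nat) (l : List Char) : List Char := List.replicate (n - l.length) '0' ++ l

-- A's inner loop: for p, b in zip(pp, bits): if p != 'I' and b == '1': nb_xyz += 1
def pvNbxyz (pp bits : List Char) : Nat :=
  (pp.zip bits).foldl (fun k pb => if pb.1 ≠ 'I' ∧ pb.2 = '1' then k + 1 else k) 0

def get_bitscoef (pauli_string : List String) (coef : Int) : List (String × Int) :=
  let nb_qubits := pauli_string.length
  let pp := (pauli_string.map String.toList).flatten
  (List.range (2 ^ nb_qubits)).foldl
    (fun acc i =>
      let bits := pvZfill nb_qubits (pvBinRep i)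
      let nb_xyz := pvNbxyz pp bits
      acc ++ [(String.mk bits, if nb_xyz % 2 = 0 then coef else -coef)])
    []

-- ===== PORT B =====
-- one doubling step: every (s, c) becomes (s+'0', c) and (s+'1', -c if flip else c)
def pvStep (flip : Bool) (res : List (List Char × Int)) : List (List Char × Int) :=
  res.flatMap (fun sc => [(sc.1 ++ ['0'], sc.2), (sc.1 ++ ['1'], if flip then -sc.2 else sc.2)])

def get_bitscoef_alt (pauli_string : List String) (coef : Int) : List (String × Int) :=
  let n := pauli_string.length
  let pp := (pauli_string.map String.toList).flatten
  ((List.range n).foldl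
      (fun res i =>
        let flip := match pp[i]? with | some p => p != 'I' | none => false
        pvStep flip res)
      [([], coef)]).map (fun sc => (String.mk sc.1, sc.2))

-- ===== PRECONDITION & SPEC =====
-- On the empty Pauli string A returns [("0", coef)] (bin(0)[2:]="0", zfill(0) does not
-- truncate), while B returns [("", coef)], the intended single length-0 bitstring.
def D_get_bitscoef (pauli_string : List String) (coef : Int) : Prop := pauli_string = []
instance (pauli_string : List String) (coef : Int) : Decidable (D_get_bitscoef pauli_string coef) := by unfold D_get_bitscoef; infer_instance

def Spec_get_bitscoef (pauli_string : List String) (coef : Int) (out : List (String × Int)) : Prop :=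
  ¬ D_get_bitscoef pauli_string coef → out = get_bitscoef_alt pauli_string coef
instance (pauli_string : List String) (coef : Int) (out : List (String × Int)) : Decidable (Spec_get_bitscoef pauli_string coef out) := by unfold Spec_get_bitscoef; infer_instance

def pvDiffWitness_get_bitscoef : List String × Int := ([], 1)
def pvDiffWitnessOut_get_bitscoef : (List (String × Int)) × (List (String × Int)) :=
  ([("0", 1)], [("", 1)])

-- ===== CLAIM (what is proved, stated in full; the proofs are below) =====
def Claim_unchanged_get_bitscoef : Prop := ∀ (pauli_string : List String) (coef : Int), Dom_get_bitscoef pauli_string coef → Spec_get_bitscoef pauli_string coef (get_bitscoef pauli_string coef)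
def Claim_changed_get_bitscoef : Prop := Dom_get_bitscoef (pvDiffWitness_get_bitscoef.1) (pvDiffWitness_get_bitscoef.2) ∧ D_get_bitscoef (pvDiffWitness_get_bitscoef.1) (pvDiffWitness_get_bitscoef.2) ∧ get_bitscoef (pvDiffWitness_get_bitscoef.1) (pvDiffWitness_get_bitscoef.2) = pvDiffWitnessOut_get_bitscoef.1 ∧ get_bitscoef_alt (pvDiffWitness_get_bitscoef.1) (pvDiffWitness_get_bitscoef.2) = pvDiffWitnessOut_get_bitscoef.2 ∧ pvDiffWitnessOut_get_bitscoef.1 ≠ pvDiffWitnessOut_get_bitscoef.2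
def Claim_exact_get_bitscoef : Prop := ∀ (pauli_string : List String) (coef : Int), Dom_get_bitscoef pauli_string coef → D_get_bitscoef pauli_string coef → get_bitscoef pauli_string coef ≠ get_bitscoef_alt pauli_string coef

-- ===== LEMMAS AND PROOFS =====

-- the common closed form: the low k bits of i, most significant first
def pvBitsOf : Nat → Nat → List Char
  | 0, _ => []
  | k+1, i => pvBitsOf k (i / 2) ++ [if i % 2 = 1 then '1' else '0']

theorem pv_foldl_append_map {α β : Type} (l : List α) (f : α → β) (acc : List β) :
    l.foldl (fun a x => a ++ [f x]) acc = acc ++ l.map f := by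
  induction l generalizing acc with
  | nil => simp
  | cons x xs ih => simp [List.foldl_cons, ih]

theorem pv_zfill_step (n i : Nat) :
    pvZfill (n + 2) (pvBinRep i) =
      pvZfill (n + 1) (pvBinRep (i / 2)) ++ [if i % 2 = 1 then '1' else '0'] := by
  rcases Nat.eq_zero_or_pos i with h0 | h1
  · subst h0
    simp [pvZfill, pvBinRep, List.replicate_succ']
  rcases Nat.lt_or_ge i 2 with h2 | h2
  · have : i = 1 := by omega
    subst this
    simp [pvZfill, pvBinRep, pvBin', List.replicate_succ']
  · -- i ≥ 2, so i/2 ≥ 1 and both sides use pvBin'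
    obtain ⟨k, rfl⟩ : ∃ k, i = k + 1 := ⟨i - 1, by omega⟩
    have hd : (k + 1) / 2 ≠ 0 := by omega
    obtain ⟨m, hm⟩ : ∃ m, (k + 1) / 2 = m + 1 := ⟨(k + 1) / 2 - 1, by omega⟩
    simp only [pvBinRep, pvZfill, Nat.succ_ne_zero, if_neg, hd, if_false]
    rw [show pvBin' (k + 1) = pvBin' ((k + 1) / 2) ++ [if (k + 1) % 2 = 1 then '1' else '0']
        from by rw [pvBin']]
    simp only [List.length_append, List.length_singleton]
    rw [show n + 2 - ((pvBin' ((k+1)/2)).length + 1) = n + 1 - (pvBin' ((k+1)/2)).length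
        from by omega]
    simp [List.append_assoc]

theorem pv_zfill_bits (n : Nat) : ∀ i : Nat, i < 2 ^ (n + 1) →
    pvZfill (n + 1) (pvBinRep i) = pvBitsOf (n + 1) i := by
  induction n with
  | zero =>
    intro i hi
    interval_cases i
    · simp [pvZfill, pvBinRep, pvBitsOf]
    · simp [pvZfill, pvBinRep, pvBin', pvBitsOf]
  | succ n ih =>
    intro i hi
    have hdiv : i / 2 < 2 ^ (n + 1) := by
      have := Nat.pow_succ 2 (n + 1)
      omega
    rw [pv_zfill_step, ih (i / 2) hdiv]
    rfl

theorem pv_zip_append (c : Char) : ∀ (l pp : List Char),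
    pp.zip (l ++ [c]) =
      pp.zip l ++ (match pp[l.length]? with | some p => [(p, c)] | none => []) := by
  intro l
  induction l with
  | nil => intro pp; cases pp <;> simp
  | cons x xs ih => intro pp; cases pp with
    | nil => simp
    | cons p ps => simpa using ih ps

theorem pv_nbxyz_append (pp l : List Char) (c : Char) :
    pvNbxyz pp (l ++ [c]) =
      pvNbxyz pp l +
        (match pp[l.length]? with
         | some p => if p ≠ 'I' ∧ c = '1' then 1 else 0
         | none => 0) := by
  unfold pvNbxyz
  rw [pv_zip_append, List.foldl_append]
  rcases h : pp[l.length]? with _ | p <;> simp <;> split_ifs <;> simp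

theorem pv_range_double {α : Type} (m : Nat) (f : Nat → α) :
    (List.range (2 * m)).map f = (List.range m).flatMap (fun i => [f (2 * i), f (2 * i + 1)]) := by
  induction m with
  | zero => simp
  | succ m ih =>
    rw [show 2 * (m + 1) = (2 * m + 1) + 1 from by ring, List.range_succ, List.range_succ,
        List.range_succ, List.flatMap_append]
    simp [ih]

theorem pvBitsOf_double (k i : Nat) :
    pvBitsOf (k + 1) (2 * i) = pvBitsOf k i ++ ['0'] ∧
    pvBitsOf (k + 1) (2 * i + 1) = pvBitsOf k i ++ ['1'] := by
  constructor <;>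
    simp [pvBitsOf, Nat.mul_div_cancel_left, Nat.mul_mod_right,
      show (2 * i + 1) / 2 = i from by omega, show (2 * i + 1) % 2 = 1 from by omega]

theorem pvBitsOf_length : ∀ (k i : Nat), (pvBitsOf k i).length = k := by
  intro k
  induction k with
  | zero => intro i; rfl
  | succ k ih => intro i; simp [pvBitsOf, ih]

-- B's doubling loop computes the closed form
theorem pv_alt_invariant (pp : List Char) (coef : Int) : ∀ k : Nat,
    (List.range k).foldl
        (fun res i =>
          let flip := match pp[i]? with | some p => p != 'I' | none => false
          pvStep flip res)
        [([], coef)] =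
      (List.range (2 ^ k)).map
        (fun i => (pvBitsOf k i, if pvNbxyz pp (pvBitsOf k i) % 2 = 0 then coef else -coef)) := by
  intro k
  induction k with
  | zero => simp [pvBitsOf, pvNbxyz]
  | succ k ih =>
    rw [List.range_succ, List.foldl_append, ih]
    rw [show (2 : Nat) ^ (k + 1) = 2 * 2 ^ k from by ring, pv_range_double]
    simp only [List.foldl_cons, List.foldl_nil, pvStep, List.flatMap_map]
    apply List.flatMap_congr
    intro i _
    have hb := pvBitsOf_double k i
    have h0 : pvNbxyz pp (pvBitsOf k i ++ ['0']) = pvNbxyz pp (pvBitsOf k i) := by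
      rw [pv_nbxyz_append]
      rcases pp[(pvBitsOf k i).length]? with _ | p <;> simp
    have h1 := pv_nbxyz_append pp (pvBitsOf k i) '1'
    rw [pvBitsOf_length] at h1
    simp only [Function.comp, hb.1, hb.2, h0]
    rcases hp : pp[k]? with _ | p
    · simp [hp] at h1
      simp [hp, h1]
    · by_cases hI : p = 'I'
      · subst hI
        simp [hp] at h1
        simp [hp, h1]
      · simp [hp, hI] at h1
        by_cases hm : pvNbxyz pp (pvBitsOf k i) % 2 = 0 <;>
          simp [hp, hI, h1, hm, Nat.add_mod, show ((pvNbxyz pp (pvBitsOf k i)) + 1) % 2 = 0 ↔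
            ¬ (pvNbxyz pp (pvBitsOf k i)) % 2 = 0 from by omega] <;> omega

theorem pv_A_closed (pauli_string : List String) (coef : Int) (m : Nat)
    (hn : pauli_string.length = m + 1) :
    get_bitscoef pauli_string coef =
      (List.range (2 ^ (m + 1))).map
        (fun i =>
          (String.mk (pvBitsOf (m + 1) i),
           if pvNbxyz ((pauli_string.map String.toList).flatten) (pvBitsOf (m + 1) i) % 2 = 0
           then coef else -coef)) := by
  unfold get_bitscoef
  simp only [hn]
  rw [pv_foldl_append_map]
  simp only [List.nil_append]
  apply List.map_congr_left
  intro i hi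
  rw [List.mem_range] at hi
  rw [pv_zfill_bits m i hi]

-- ===== VERDICT (by name: the statement is the Claim_ definition above) =====
theorem get_bitscoef_spec : Claim_unchanged_get_bitscoef := by
  intro pauli_string coef _ hD
  unfold D_get_bitscoef at hD
  obtain ⟨m, hm⟩ : ∃ m, pauli_string.length = m + 1 := by
    cases pauli_string with
    | nil => exact absurd rfl hD
    | cons x xs => exact ⟨xs.length, rfl⟩
  rw [pv_A_closed pauli_string coef m hm]
  unfold get_bitscoef_alt
  simp only [hm]
  rw [pv_alt_invariant]
  rw [List.map_map]
  rfl

theorem get_bitscoef_changed : Claim_changed_get_bitscoef := by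
  unfold Claim_changed_get_bitscoef
  refine ⟨by decide, rfl, ?_, by decide, by decide⟩
  show get_bitscoef [] 1 = [("0", 1)]
  simp [get_bitscoef, List.range_succ, pvZfill, pvBinRep, pvNbxyz]
  rfl

theorem get_bitscoef_tight : Claim_exact_get_bitscoef := by
  intro pauli_string coef _ hD h
  subst hD
  have hA : get_bitscoef [] coef =
      [(String.mk ['0'], if pvNbxyz [] ['0'] % 2 = 0 then coef else -coef)] := by
    simp [get_bitscoef, List.range_succ, pvZfill, pvBinRep]
  have hB : get_bitscoef_alt [] coef = [(String.mk [], coef)] := by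
    simp [get_bitscoef_alt]
  rw [hA, hB] at h
  simp [pvNbxyz] at h
  exact absurd h (by decide)
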